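-- pv_equiv track=rewrite | github.com/alexandraback/datacollection | solutions_2692487_0/Python/Yury/src.py | calc
-- ===== SOURCE A (Python) =====
-- def calc(A, ns):
--   ns = sorted(ns, key=lambda x: -x)
--
--   smi = len(ns)
--   ad  = 0
--
--   if A == 1: return len(ns)
--
--   while len(ns) > 0:
--     N = ns[-1]
--
--     if N < A:
--       A = A + N
--       ns.pop()
--     else:
--       A = A + A - 1
--       ad = ad + 1
--
--     smi = min(smi, ad + len(ns))
--
--
--
--
--
--   return smi
-- ===== SOURCE B (Python) =====
-- def calc(A, ns):
--     xs = sorted(ns)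
--     n = len(xs)
--     if A == 1:
--         return n
--
--     smi = n
--     ad = 0
--     for i, N in enumerate(xs):
--         if N >= A:
--             # closed-form number of doublings: smallest k with (A-1)*2**k >= N
--             q = -(-N // (A - 1))          # ceil(N / (A-1))
--             k = (q - 1).bit_length()
--             smi = min(smi, ad + 1 + (n - i))
--             ad += k
--             A = (A - 1) * 2 ** k + 1
--         A += N
--         smi = min(smi, ad + (n - i - 1))
--     return smi
-- ===== Notes on version B (the rewrite author's own statement) =====
-- stated objective: alternative
-- what changed: Instead of copy-sorting descending and popping from the end while doubling the power one unit step at a time in a while-loop, B makes a single forward pass over the ascending sort with an index and computes the number of doublings needed for each power-up in closed form via ceiling division and bit_length.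
-- outside the precondition, e.g. on calc(5, [-3]): A returns 0, B returns 0
import Mathlib
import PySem

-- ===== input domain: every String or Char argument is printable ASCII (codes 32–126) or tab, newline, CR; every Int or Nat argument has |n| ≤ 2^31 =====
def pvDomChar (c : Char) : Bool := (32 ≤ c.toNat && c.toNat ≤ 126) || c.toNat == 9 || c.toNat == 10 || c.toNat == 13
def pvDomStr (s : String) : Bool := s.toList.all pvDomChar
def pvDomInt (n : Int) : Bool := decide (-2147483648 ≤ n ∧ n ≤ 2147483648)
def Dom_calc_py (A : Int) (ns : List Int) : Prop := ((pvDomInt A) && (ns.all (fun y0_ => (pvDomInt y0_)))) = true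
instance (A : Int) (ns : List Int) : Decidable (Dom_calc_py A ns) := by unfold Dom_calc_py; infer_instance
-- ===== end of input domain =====

-- B replaces A's pop-from-a-descending-copy while-loop, which doubles the power one unit
-- step at a time, by a single forward pass over the ascending sort that computes the number
-- of doublings in closed form via ceiling division and bit_length (objective: alternative).


-- ===== PORT A =====
-- A's while-loop; `fuel` only makes the recursion total: on every input admitted by
-- Pre_calc_py the supplied fuel is proved sufficient (≤ 33 loop iterations per element).
def calcLoop : Nat → Int → List Int → Int → Int → Int
  | 0, _, _, smi, _ => smi
  | fuel + 1, A, ns, smi, ad =>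
    if ns = [] then smi
    else
      let N := (PySem.List.pyGet? ns (-1)).getD 0   -- ns[-1]; ns ≠ [] here, so never IndexError
      if N < A then
        calcLoop fuel (A + N) ns.dropLast (min smi (ad + (ns.dropLast.length : Int))) ad
      else
        calcLoop fuel (A + A - 1) ns (min smi ((ad + 1) + (ns.length : Int))) (ad + 1)

def calc_py (A : Int) (ns : List Int) : Int :=
  let ds := PySem.List.sorted ns (fun x => -x)      -- sorted(ns, key=lambda x: -x)
  if A = 1 then (ds.length : Int)
  else calcLoop (33 * ds.length + 1) A ds (ds.length : Int) 0

-- ===== PORT B =====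
def altGo : Int → List Int → Int → Int → Int → Int → Int
  | _, [], _, _, smi, _ => smi
  | A, N :: rest, n, i, smi, ad =>
    if A ≤ N then
      let q := -(PySem.Int.floordiv (-N) (A - 1))   -- ceil(N / (A-1)) = -(-N // (A-1))
      let k := PySem.Int.bitLength (q - 1)          -- (q - 1).bit_length()
      altGo ((A - 1) * 2 ^ k + 1 + N) rest n (i + 1)
        (min (min smi (ad + 1 + (n - i))) ((ad + (k : Int)) + (n - i - 1))) (ad + (k : Int))
    else
      altGo (A + N) rest n (i + 1) (min smi (ad + (n - i - 1))) ad

def calc_py_alt (A : Int) (ns : List Int) : Int :=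
  let xs := PySem.List.sorted ns (fun x => x)       -- sorted(ns)
  let n := (xs.length : Int)
  if A = 1 then n else altGo A xs n 0 n 0

-- ===== PRECONDITION & SPEC =====
-- Pre_ restricts to the problem's natural domain (hero power ≥ 2, or the A == 1 early
-- return, and monster strengths ≥ 1): outside it A's while-loop can run forever (once the
-- power drops to ≤ 1 the doubling step never increases it).  On excluded inputs where A
-- does still terminate, B happens to return the same value (see the cite in claim.json).
def Pre_calc_py (A : Int) (ns : List Int) : Prop :=
  A = 1 ∨ (2 ≤ A ∧ ∀ x ∈ ns, 1 ≤ x)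
instance (A : Int) (ns : List Int) : Decidable (Pre_calc_py A ns) := by unfold Pre_calc_py; infer_instance

def pvWitness_calc_py : Int × List Int := (2, [1, 3, 2])

def Spec_calc_py (A : Int) (ns : List Int) (out : Int) : Prop := out = calc_py_alt A ns
instance (A : Int) (ns : List Int) (out : Int) : Decidable (Spec_calc_py A ns out) := by unfold Spec_calc_py; infer_instance

-- ===== CLAIM (what is proved, stated in full; the proofs are below) =====
def Claim_equal_calc_py : Prop := ∀ (A : Int) (ns : List Int), Dom_calc_py A ns → Pre_calc_py A ns → Spec_calc_py A ns (calc_py A ns)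

-- ===== LEMMAS AND PROOFS =====

theorem pyGet_last (l : List Int) (N : Int) : PySem.List.pyGet? (l ++ [N]) (-1) = some N := by
  simp [PySem.List.pyGet?, PySem.List.pyIdx?]

-- the descending stable sort reversed is the ascending stable sort (on Int values)
theorem rev_sorted_neg (ns : List Int) :
    (PySem.List.sorted ns (fun x => -x)).reverse = PySem.List.sorted ns (fun x => x) := by
  apply PySem.List.eq_of_perm_of_pairwise_le_of_injective (fun x : Int => x) (fun a b h => h)
  · exact ((PySem.List.sorted ns (fun x => -x)).reverse_perm.trans
      (PySem.List.sorted_perm ns (fun x => -x) false)).trans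
      (PySem.List.sorted_perm ns (fun x => x) false).symm
  · rw [List.pairwise_reverse]
    exact (PySem.List.sorted_pairwise ns (fun x => -x)).imp (fun h => by omega)
  · exact PySem.List.sorted_pairwise ns (fun x => x)

-- k consecutive doubling iterations of A's while-loop, collapsed into one step
theorem calcLoop_doubles (k : Nat) : ∀ (fuel : Nat) (A smi ad N : Int) (l : List Int),
    0 < k → (∀ j : Nat, j < k → (A - 1) * 2 ^ j < N) →
    calcLoop (fuel + k) A (l ++ [N]) smi ad
      = calcLoop fuel ((A - 1) * 2 ^ k + 1) (l ++ [N])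
          (min smi (ad + 1 + ((l ++ [N]).length : Int))) (ad + k) := by
  induction k with
  | zero => omega
  | succ k ih =>
    intro fuel A smi ad N l _ hlt
    have h0 : (A - 1) * 2 ^ 0 < N := hlt 0 (by omega)
    have hstep : calcLoop (fuel + (k + 1)) A (l ++ [N]) smi ad
        = calcLoop (fuel + k) (A + A - 1) (l ++ [N])
            (min smi ((ad + 1) + ((l ++ [N]).length : Int))) (ad + 1) := by
      show calcLoop ((fuel + k) + 1) A (l ++ [N]) smi ad = _
      have h0' : A - 1 < N := by simpa using h0
      have hNA : ¬ ((N : Int) < A) := by omega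
      rw [calcLoop]
      simp [hNA]
    rw [hstep]
    rcases Nat.eq_zero_or_pos k with hk | hk
    · subst hk
      congr 1 <;> push_cast <;> ring_nf
    · rw [ih (fuel) (A + A - 1) _ (ad + 1) N l hk ?_]
      · congr 1
        · ring_nf
        · have : (0:Int) ≤ ((l ++ [N]).length : Int) := by positivity
          push_cast
          omega
        · push_cast; ring
      · intro j hj
        have := hlt (j + 1) (by omega)
        have h2 : (A + A - 1 - 1) * 2 ^ j = (A - 1) * 2 ^ (j + 1) := by ring
        omega

-- the central invariant: A's loop over the reversed (descending) list computes the same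
-- value as B's forward pass with the closed-form doubling count
theorem main_loop : ∀ (xs : List Int) (A smi ad i n : Int) (fuel : Nat),
    2 ≤ A → (∀ x ∈ xs, 1 ≤ x ∧ x ≤ 2147483648) → n - i = (xs.length : Int) →
    33 * xs.length + 1 ≤ fuel →
    calcLoop fuel A xs.reverse smi ad = altGo A xs n i smi ad := by
  intro xs
  induction xs with
  | nil =>
    intro A smi ad i n fuel _ _ _ hfuel
    match fuel, hfuel with
    | f + 1, _ => rw [calcLoop]; simp [altGo]
  | cons N rest ih =>
    intro A smi ad i n fuel hA hb hn hfuel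
    have hN1 : 1 ≤ N := (hb N (by simp)).1
    have hN2 : N ≤ 2147483648 := (hb N (by simp)).2
    have hb' : ∀ x ∈ rest, 1 ≤ x ∧ x ≤ 2147483648 := fun x hx => hb x (by simp [hx])
    have hlen : n - i = (rest.length : Int) + 1 := by
      simp only [List.length_cons] at hn; push_cast at hn; omega
    rw [List.reverse_cons]
    by_cases hNA : N < A
    · -- A absorbs the smallest remaining monster at once; so does B
      match fuel, hfuel with
      | f + 1, hfuel =>
        rw [calcLoop]
        simp only [List.append_eq_nil_iff, List.cons_ne_nil, and_false, if_false,
          pyGet_last, Option.getD_some, if_pos hNA, List.dropLast_concat]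
        rw [altGo]
        simp only [if_neg (by omega : ¬ A ≤ N)]
        have h1 : ad + (rest.reverse.length : Int) = ad + (n - i - 1) := by
          simp; omega
        rw [h1, ih (A + N) _ ad (i + 1) n f (by omega) hb' (by push_cast; omega)
          (by simp at hfuel ⊢; omega)]
    · -- doubling phase: B's q = ceil(N/(A-1)) and k = (q-1).bit_length() are exactly the
      -- number of iterations A's loop spends doubling, collapsed by calcLoop_doubles
      have hA1 : (0:Int) < A - 1 := by omega
      set q : Int := -(PySem.Int.floordiv (-N) (A - 1)) with hq
      have hbr : (q - 1) * (A - 1) < N ∧ N ≤ q * (A - 1) :=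
        (PySem.Int.neg_floordiv_neg_eq_iff_of_pos hA1).mp rfl
      have hq2 : 2 ≤ q := by nlinarith [hbr.1, hbr.2]
      have hqN : q ≤ N := by nlinarith [hbr.1]
      set k : Nat := PySem.Int.bitLength (q - 1) with hkdef
      have habs : ((q - 1).natAbs : Int) = q - 1 := Int.natAbs_of_nonneg (by omega)
      have hpow_ge : (q : Int) ≤ 2 ^ k := by
        have h := PySem.Int.lt_two_pow_bitLength (q - 1)
        have : ((q - 1).natAbs : Int) < ((2 ^ k : Nat) : Int) := by exact_mod_cast h
        rw [habs] at this; push_cast at this; omega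
      have hk1 : 0 < k := by
        by_contra h
        have hk0 : k = 0 := by omega
        have h2 := PySem.Int.lt_two_pow_bitLength (q - 1)
        rw [← hkdef, hk0] at h2
        simp at h2
        omega
      have hpow_le : ∀ j : Nat, j < k → (2:Int) ^ j ≤ q - 1 := by
        intro j hj
        have h := PySem.Int.two_pow_bitLength_le (q - 1) (by omega)
        have h2 : (2:Nat) ^ j ≤ 2 ^ (k - 1) := Nat.pow_le_pow_right (by omega) (by omega)
        have h3 : ((2:Nat) ^ j : Int) ≤ ((q - 1).natAbs : Int) := by exact_mod_cast le_trans h2 h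
        rw [habs] at h3; push_cast at h3; omega
      have hk31 : k ≤ 31 := by
        have h := PySem.Int.two_pow_bitLength_le (q - 1) (by omega)
        rw [← hkdef] at h
        have hqa : (q - 1).natAbs < 2147483648 := by
          have : ((q - 1).natAbs : Int) < 2147483648 := by rw [habs]; omega
          exact_mod_cast this
        have hpow31 : (2:Nat) ^ 31 = 2147483648 := by norm_num
        have hlt : (2:Nat) ^ (k - 1) < 2 ^ 31 := by omega
        have := (Nat.pow_lt_pow_iff_right (by omega : 1 < 2)).mp hlt
        omega
      have hd : ∀ j : Nat, j < k → (A - 1) * 2 ^ j < N := by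
        intro j hj
        have := hpow_le j hj
        nlinarith [hbr.1, pow_pos (by omega : (0:Int) < 2) j]
      have hdone : N < (A - 1) * 2 ^ k + 1 := by nlinarith [hbr.2]
      have hf : fuel = ((fuel - k - 1) + 1) + k := by simp at hfuel; omega
      rw [hf, calcLoop_doubles k ((fuel - k - 1) + 1) A smi ad N rest.reverse hk1 hd]
      rw [calcLoop]
      simp only [List.append_eq_nil_iff, List.cons_ne_nil, and_false, if_false,
        pyGet_last, Option.getD_some, if_pos hdone, List.dropLast_concat]
      rw [altGo]
      simp only [if_pos (by omega : A ≤ N), ← hq, ← hkdef]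
      have hlen2 : ad + 1 + ((rest.reverse ++ [N]).length : Int) = ad + 1 + (n - i) := by
        simp; omega
      have hlen3 : ad + (k:Int) + (rest.reverse.length : Int) = ad + (k:Int) + (n - i - 1) := by
        simp; omega
      rw [hlen2, hlen3]
      apply ih ((A - 1) * 2 ^ k + 1 + N) _ _ (i + 1) n (fuel - k - 1)
        (by nlinarith [pow_pos (by omega : (0:Int) < 2) k])
        hb' (by push_cast; omega) (by simp at hfuel ⊢; omega)

theorem calc_eq_alt (A : Int) (ns : List Int)
    (hdomns : ∀ x ∈ ns, x ≤ 2147483648)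
    (hpre : A = 1 ∨ (2 ≤ A ∧ ∀ x ∈ ns, 1 ≤ x)) :
    calc_py A ns = calc_py_alt A ns := by
  have hlen1 : (PySem.List.sorted ns (fun x => -x)).length = ns.length :=
    (PySem.List.sorted_perm ns (fun x => -x) false).length_eq
  have hlen2 : (PySem.List.sorted ns (fun x => x)).length = ns.length :=
    (PySem.List.sorted_perm ns (fun x => x) false).length_eq
  rcases hpre with h1 | ⟨hA, hpos⟩
  · simp [calc_py, calc_py_alt, h1, hlen1, hlen2]
  · have hA1 : ¬ (A = 1) := by omega
    simp only [calc_py, calc_py_alt, if_neg hA1]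
    have hrev : PySem.List.sorted ns (fun x => -x) = (PySem.List.sorted ns (fun x => x)).reverse := by
      rw [← rev_sorted_neg ns, List.reverse_reverse]
    rw [hrev]
    have hmem : ∀ x ∈ PySem.List.sorted ns (fun x => x), 1 ≤ x ∧ x ≤ 2147483648 := by
      intro x hx
      have := (PySem.List.sorted_perm ns (fun x => x) false).mem_iff.mp hx
      exact ⟨hpos x this, hdomns x this⟩
    have hl : ((PySem.List.sorted ns (fun x => x)).reverse.length : Int)
        = ((PySem.List.sorted ns (fun x => x)).length : Int) := by simp
    rw [hl]
    exact main_loop _ A _ 0 0 _ _ hA hmem (by omega) (by simp)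

-- ===== VERDICT (by name: the statement is the Claim_ definition above) =====
theorem calc_py_spec : Claim_equal_calc_py := by
  intro A ns hdom hpre
  unfold Spec_calc_py
  simp only [Dom_calc_py, pvDomInt, Bool.and_eq_true, List.all_eq_true,
    decide_eq_true_eq] at hdom
  exact calc_eq_alt A ns (fun x hx => (hdom.2 x hx).2) hpre
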